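-- pv_equiv track=rewrite | github.com/YabseraBogale/python-Scripts | neural.py | out_put_layer
-- ===== SOURCE A (Python) =====
-- def out_put_layer(pa_ed_layer):
--     weight=[1,0]
--     bias=[0,1]
--     result=[0,0]
--     i=0
--     while i<len(weight):
--         j=0
--         while j<len(pa_ed_layer):
--             result[i]+=(weight[i]*pa_ed_layer[j])+bias[i]
--             j+=1
--         i+=1
--     return result
-- ===== SOURCE B (Python) =====
-- def out_put_layer(pa_ed_layer):
--     # result[0] = 1*sum + 0*n, result[1] = 0*sum + 1*n
--     return [sum(pa_ed_layer), len(pa_ed_layer)]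
-- ===== Notes on version B (the rewrite author's own statement) =====
-- stated objective: faster
-- what changed: B replaces the fixed 2-neuron nested weighted-sum loop with a direct closed form: since the hard-coded weights and biases make neuron 0 the plain sum and neuron 1 the element count, B returns the sum and the length in one pass each.
import Mathlib
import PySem

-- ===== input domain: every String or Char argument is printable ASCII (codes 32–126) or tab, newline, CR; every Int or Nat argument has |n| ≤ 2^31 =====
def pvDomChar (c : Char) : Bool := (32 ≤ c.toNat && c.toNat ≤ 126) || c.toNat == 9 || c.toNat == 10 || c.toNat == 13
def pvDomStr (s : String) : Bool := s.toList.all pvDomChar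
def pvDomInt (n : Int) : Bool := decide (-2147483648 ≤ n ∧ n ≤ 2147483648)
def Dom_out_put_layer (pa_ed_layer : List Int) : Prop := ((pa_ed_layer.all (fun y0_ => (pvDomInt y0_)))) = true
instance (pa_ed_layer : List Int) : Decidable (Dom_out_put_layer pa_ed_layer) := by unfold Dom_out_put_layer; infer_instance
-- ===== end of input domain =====

-- B replaces A's fixed 2-neuron nested weighted-sum loop by the closed form [sum, length] (faster by a constant factor).


-- ===== PORT A =====
-- inner while loop: j runs over pa_ed_layer, accumulating result[i] += weight[i]*xs[j] + bias[i]
def pvInner (w b : Int) (xs : List Int) (j : Nat) (acc : Int) : Int :=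
  if h : j < xs.length then pvInner w b xs (j + 1) (acc + (w * xs[j] + b)) else acc
termination_by xs.length - j

-- outer while loop: i runs over weight, updating the cell result[i]
def pvOuter (weight bias xs : List Int) (i : Nat) (result : List Int) : List Int :=
  if h : i < weight.length then
    pvOuter weight bias xs (i + 1)
      (result.set i (pvInner weight[i] (bias.getD i 0) xs 0 (result.getD i 0)))
  else result
termination_by weight.length - i

def out_put_layer (pa_ed_layer : List Int) : List Int :=
  pvOuter [1, 0] [0, 1] pa_ed_layer 0 [0, 0]

-- ===== PORT B =====
def out_put_layer_alt (pa_ed_layer : List Int) : List Int :=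
  [pa_ed_layer.sum, (pa_ed_layer.length : Int)]

-- ===== PRECONDITION & SPEC =====
def Spec_out_put_layer (pa_ed_layer : List Int) (out : List Int) : Prop := out = out_put_layer_alt pa_ed_layer
instance (pa_ed_layer : List Int) (out : List Int) : Decidable (Spec_out_put_layer pa_ed_layer out) := by unfold Spec_out_put_layer; infer_instance

-- ===== CLAIM (what is proved, stated in full; the proofs are below) =====
def Claim_equal_out_put_layer : Prop := ∀ (pa_ed_layer : List Int), Dom_out_put_layer pa_ed_layer → Spec_out_put_layer pa_ed_layer (out_put_layer pa_ed_layer)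

-- ===== LEMMAS AND PROOFS =====

theorem pvInner_eq (w b : Int) (xs : List Int) : ∀ (j : Nat) (acc : Int),
    pvInner w b xs j acc = acc + w * (xs.drop j).sum + b * ((xs.drop j).length : Int) := by
  intro j
  induction hn : xs.length - j generalizing j with
  | zero =>
    intro acc
    rw [pvInner]
    have hlt : ¬ j < xs.length := by omega
    have hd : xs.drop j = [] := List.drop_eq_nil_of_le (by omega)
    rw [hd]
    simp [hlt]
  | succ n ih =>
    intro acc
    have hj : j < xs.length := by omega
    rw [pvInner]
    simp only [hj, dif_pos]
    rw [ih (j + 1) (by omega), List.drop_eq_getElem_cons hj]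
    simp only [List.sum_cons, List.length_cons]
    push_cast
    ring

theorem out_put_layer_spec : Claim_equal_out_put_layer := by
  intro xs _
  unfold Spec_out_put_layer out_put_layer out_put_layer_alt
  rw [pvOuter]
  norm_num
  rw [pvOuter]
  norm_num
  rw [pvOuter]
  simp [pvInner_eq]

-- ===== VERDICT (by name: the statement is the Claim_ definition above) =====
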